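-- pv_equiv track=rewrite | github.com/yuwenchen31/translation_detection | all_feat_classification.py | single_proper_noun_counts
-- ===== SOURCE A (Python) =====
-- def single_proper_noun_counts(sent_pos):
--
--     flat_pos = [item for sublist in sent_pos for item in sublist]
--
--     count = 0
--     for i,j in enumerate(flat_pos):
--
--         try:
--             if j == 'PROPN' and flat_pos[i-1] != 'PROPN' and flat_pos[i+1] != 'PROPN':
--                 count += 1
--
--         # if indexerror:  it means 'PROPN' is at the last position in the flat_pos,
--         # so count will +1
--         except IndexError:
--             count += 1
--
--
--     return count
-- ===== SOURCE B (Python) =====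
-- def single_proper_noun_counts(sent_pos):
--     # One streaming pass with a pending-candidate state machine: no flattened
--     # list, no index arithmetic, no exception handling.
--     count = 0
--     prev = None
--     pending = False  # previous tag was 'PROPN' with no 'PROPN' before it
--     for sent in sent_pos:
--         for tag in sent:
--             if pending and tag != 'PROPN':
--                 count += 1
--             pending = (tag == 'PROPN' and prev != 'PROPN')
--             prev = tag
--     if pending:
--         count += 1
--     return count
-- ===== Notes on version B (the rewrite author's own statement) =====
-- stated objective: simpler
-- what changed: Replaces the flattened list plus index arithmetic with try/except IndexError by a single streaming pass over the nested lists carrying a (prev, pending-candidate) state machine; no intermediate list, no indexing, no exceptions.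
-- intended difference: On inputs whose flattened tag sequence starts with 'PROPN', ends with 'PROPN', and whose second tag (if any) is not 'PROPN', A's wraparound flat_pos[-1] at i==0 treats the last tag as the first tag's predecessor and returns one less than the number of isolated 'PROPN's (e.g. 0 on [['PROPN']], 1 on [['PROPN','X','PROPN']]), while B returns the intended count (1 resp. 2) that treats the sequence start as having no predecessor. — e.g. on single_proper_noun_counts([["PROPN"]]): A returns 0, B returns 1
import Mathlib
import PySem

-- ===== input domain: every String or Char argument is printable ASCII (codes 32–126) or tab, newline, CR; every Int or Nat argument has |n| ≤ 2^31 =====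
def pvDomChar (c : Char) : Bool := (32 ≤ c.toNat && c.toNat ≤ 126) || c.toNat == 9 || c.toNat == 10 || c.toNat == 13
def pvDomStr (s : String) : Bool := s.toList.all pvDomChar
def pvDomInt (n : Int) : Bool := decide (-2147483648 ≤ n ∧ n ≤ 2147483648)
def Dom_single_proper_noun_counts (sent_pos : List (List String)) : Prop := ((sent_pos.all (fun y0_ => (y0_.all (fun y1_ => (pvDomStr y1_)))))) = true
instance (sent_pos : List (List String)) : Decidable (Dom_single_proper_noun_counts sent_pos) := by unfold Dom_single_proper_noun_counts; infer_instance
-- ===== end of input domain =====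

-- B replaces A's flattened list + index arithmetic + try/except IndexError by a single streaming
-- pass carrying a (prev, pending-candidate) state machine (objective: simpler); B intentionally
-- does not reproduce A's i==0 wraparound to flat_pos[-1] (see D_ below).

-- ===== PORT A =====
def single_proper_noun_counts (sent_pos : List (List String)) : Int :=
  let flat_pos := sent_pos.flatten
  (PySem.List.enumerate flat_pos).foldl (fun count ij =>
    if ij.2 == "PROPN" then
      match PySem.List.pyGet? flat_pos (ij.1 - 1) with
      | none => count + 1
      | some p =>
        if p != "PROPN" then
          match PySem.List.pyGet? flat_pos (ij.1 + 1) with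
          | none => count + 1
          | some nx => if nx != "PROPN" then count + 1 else count
        else count
    else count) 0


-- ===== PORT B =====
def single_proper_noun_counts_alt (sent_pos : List (List String)) : Int :=
  let st := sent_pos.foldl (fun st sent =>
    sent.foldl (fun st tag =>
      let count := if st.2.2 && !(tag == "PROPN") then st.1 + 1 else st.1
      (count, (some tag, tag == "PROPN" && !(st.2.1 == some "PROPN"))))
      st)
    ((0 : Int), ((none : Option String), false))
  if st.2.2 then st.1 + 1 else st.1


-- ===== PRECONDITION & SPEC =====
-- On inputs whose flattened tag sequence starts with 'PROPN', ends with 'PROPN', and whose second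
-- tag (if any) is not 'PROPN', A's wraparound flat_pos[-1] at i==0 treats the last tag as the first
-- tag's predecessor and returns one less than the number of isolated 'PROPN's (0 on [['PROPN']],
-- 1 on [['PROPN','X','PROPN']]), while B returns the intended count (1 resp. 2) that treats the
-- start of the sequence as having no predecessor.
def D_single_proper_noun_counts (sent_pos : List (List String)) : Prop :=
  sent_pos.flatten.head? = some "PROPN" ∧ sent_pos.flatten.getLast? = some "PROPN" ∧
    sent_pos.flatten[1]? ≠ some "PROPN"
instance (sent_pos : List (List String)) : Decidable (D_single_proper_noun_counts sent_pos) := by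
  unfold D_single_proper_noun_counts; infer_instance

def Spec_single_proper_noun_counts (sent_pos : List (List String)) (out : Int) : Prop :=
  ¬ D_single_proper_noun_counts sent_pos → out = single_proper_noun_counts_alt sent_pos
instance (sent_pos : List (List String)) (out : Int) : Decidable (Spec_single_proper_noun_counts sent_pos out) := by
  unfold Spec_single_proper_noun_counts; infer_instance

def pvDiffWitness_single_proper_noun_counts : List (List String) := [["PROPN"]]
def pvDiffWitnessOut_single_proper_noun_counts : Int × Int := (0, 1)

-- ===== CLAIM (what is proved, stated in full; the proofs are below) =====
def Claim_unchanged_single_proper_noun_counts : Prop := ∀ (sent_pos : List (List String)), Dom_single_proper_noun_counts sent_pos → Spec_single_proper_noun_counts sent_pos (single_proper_noun_counts sent_pos)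
def Claim_changed_single_proper_noun_counts : Prop := Dom_single_proper_noun_counts (pvDiffWitness_single_proper_noun_counts) ∧ D_single_proper_noun_counts (pvDiffWitness_single_proper_noun_counts) ∧ single_proper_noun_counts (pvDiffWitness_single_proper_noun_counts) = pvDiffWitnessOut_single_proper_noun_counts.1 ∧ single_proper_noun_counts_alt (pvDiffWitness_single_proper_noun_counts) = pvDiffWitnessOut_single_proper_noun_counts.2 ∧ pvDiffWitnessOut_single_proper_noun_counts.1 ≠ pvDiffWitnessOut_single_proper_noun_counts.2
def Claim_exact_single_proper_noun_counts : Prop := ∀ (sent_pos : List (List String)), Dom_single_proper_noun_counts sent_pos → D_single_proper_noun_counts sent_pos → single_proper_noun_counts sent_pos ≠ single_proper_noun_counts_alt sent_pos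

-- ===== LEMMAS AND PROOFS =====

def pvN (pp : Bool) : List String → Int
  | [] => 0
  | x :: r =>
      (if x == "PROPN" && !pp && !(r.head? == some "PROPN") then 1 else 0) + pvN (x == "PROPN") r


def pvStep : (Int × (Option String × Bool)) → String → (Int × (Option String × Bool)) :=
  fun st tag =>
    let count := if st.2.2 && !(tag == "PROPN") then st.1 + 1 else st.1
    (count, (some tag, tag == "PROPN" && !(st.2.1 == some "PROPN")))


theorem pvB_fold (xs : List String) (c : Int) (prev : Option String) (pending : Bool) :
    (let st := xs.foldl pvStep (c, (prev, pending))
     if st.2.2 then st.1 + 1 else st.1)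
    = c + (if pending && !(xs.head? == some "PROPN") then 1 else 0) + pvN (prev == some "PROPN") xs := by
  induction xs generalizing c prev pending with
  | nil => cases pending <;> simp [pvN]
  | cons x r ih =>
    simp only [List.foldl_cons, pvStep]
    rw [ih]
    simp only [pvN, List.head?_cons, Option.some_beq_some]
    cases pending <;> simp <;> split_ifs <;> ring


theorem pvB_char (sp : List (List String)) :
    single_proper_noun_counts_alt sp = pvN false sp.flatten := by
  unfold single_proper_noun_counts_alt
  rw [show (fun (st : Int × (Option String × Bool)) (sent : List String) =>
        sent.foldl (fun st tag =>
          let count := if st.2.2 && !(tag == "PROPN") then st.1 + 1 else st.1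
          (count, (some tag, tag == "PROPN" && !(st.2.1 == some "PROPN")))) st)
      = (fun st sent => List.foldl pvStep st sent) from rfl, ← List.foldl_flatten]
  simpa using pvB_fold sp.flatten 0 none false


def pvCondA (xs : List String) (ij : Int × String) : Bool :=
  ij.2 == "PROPN" &&
    (match PySem.List.pyGet? xs (ij.1 - 1) with
     | none => true
     | some p =>
        p != "PROPN" &&
          (match PySem.List.pyGet? xs (ij.1 + 1) with
           | none => true
           | some nx => nx != "PROPN"))


theorem pvA_countP (sp : List (List String)) :
    single_proper_noun_counts sp
      = ((PySem.List.enumerate sp.flatten).countP (pvCondA sp.flatten) : Int) := by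
  show (PySem.List.enumerate sp.flatten).foldl _ 0 = _
  have hfun : (fun (count : Int) (ij : Int × String) =>
      if (ij.2 == "PROPN") = true then
        match PySem.List.pyGet? sp.flatten (ij.1 - 1) with
        | none => count + 1
        | some p =>
          if (p != "PROPN") = true then
            match PySem.List.pyGet? sp.flatten (ij.1 + 1) with
            | none => count + 1
            | some nx => if (nx != "PROPN") = true then count + 1 else count
          else count
      else count)
      = (fun count ij => if pvCondA sp.flatten ij then count + 1 else count) := by
    funext acc ij
    unfold pvCondA
    by_cases hj : ij.2 == "PROPN" <;> simp only [hj, Bool.false_and, Bool.true_and, if_true]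
    · cases h1 : PySem.List.pyGet? sp.flatten (ij.1 - 1) with
      | none => simp
      | some p =>
        by_cases hp : p != "PROPN" <;> simp only [hp, Bool.false_and, Bool.true_and]
        · cases h2 : PySem.List.pyGet? sp.flatten (ij.1 + 1) with
          | none => simp
          | some nx => by_cases hn : nx != "PROPN" <;> simp [hn]
        · simp
    · simp
  rw [hfun, PySem.List.foldl_if_add_one]
  simp


theorem pvL (ys : List String) : ∀ (pre : List String), pre ≠ [] →
    (((PySem.List.enumerate ys (pre.length : Int)).countP (pvCondA (pre ++ ys)) : Nat) : Int)
      = pvN (pre.getLast? == some "PROPN") ys := by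
  induction ys with
  | nil => intro pre _; simp [pvN]
  | cons y ys ih =>
    intro pre hpre
    have hpos : 1 ≤ pre.length := List.length_pos_of_ne_nil hpre
    rw [PySem.List.enumerate_cons, List.countP_cons]
    have htail := ih (pre ++ [y]) (by simp)
    rw [List.getLast?_concat] at htail
    have hlen : (pre.length : Int) + 1 = (((pre ++ [y]).length : Nat) : Int) := by simp
    have happ : pre ++ y :: ys = (pre ++ [y]) ++ ys := by simp
    rw [hlen]
    push_cast
    rw [happ, htail, ← happ]
    -- head term
    have hg1 : PySem.List.pyGet? (pre ++ y :: ys) ((pre.length : Int) - 1) = pre.getLast? := by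
      have h1 : (pre.length : Int) - 1 = ((pre.length - 1 : Nat) : Int) := by omega
      rw [h1, PySem.List.pyGet?_natCast, List.getElem?_append_left (by omega),
        List.getLast?_eq_getElem?]
    have hg2 : PySem.List.pyGet? (pre ++ y :: ys) ((pre.length : Int) + 1) = ys.head? := by
      have h1 : (pre.length : Int) + 1 = ((pre.length + 1 : Nat) : Int) := by omega
      rw [h1, PySem.List.pyGet?_natCast, List.getElem?_append_right (by omega)]
      simp [List.head?_eq_getElem?]
    obtain ⟨z, hz⟩ := List.getLast?_isSome.mpr hpre |> Option.isSome_iff_exists.mp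
    unfold pvCondA
    simp only [hg1, hg2, hz, pvN, Option.some_beq_some]
    cases hw : ys.head? with
    | none => simp only [bne]; simp; split_ifs <;> omega
    | some w => simp only [bne]; simp; simp only [and_assoc]; ring


theorem pvA_char_nil (sp : List (List String)) (h : sp.flatten = []) :
    single_proper_noun_counts sp = 0 := by
  rw [pvA_countP, h]; simp


theorem pvA_char_cons (sp : List (List String)) (x : String) (r : List String)
    (h : sp.flatten = x :: r) :
    single_proper_noun_counts sp
      = (if x == "PROPN" && !((x :: r).getLast? == some "PROPN") && !(r.head? == some "PROPN")
          then 1 else 0) + pvN (x == "PROPN") r := by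
  rw [pvA_countP, h, PySem.List.enumerate_cons, List.countP_cons]
  have hs : (0 : Int) + 1 = (([x].length : Nat) : Int) := by simp
  rw [hs]
  have htail := pvL r [x] (by simp)
  have hone : ([x] : List String) ++ r = x :: r := by simp
  rw [hone] at htail
  push_cast
  rw [htail]
  have hg1 : PySem.List.pyGet? (x :: r) ((0 : Int) - 1) = (x :: r).getLast? := by
    have : (0 : Int) - 1 = -1 := by omega
    rw [this, PySem.List.pyGet?_neg_one]
  have hg2 : PySem.List.pyGet? (x :: r) ((0 : Int) + 1) = r.head? := by
    have : (0 : Int) + 1 = ((1 : Nat) : Int) := by omega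
    rw [this, PySem.List.pyGet?_natCast]
    simp [List.head?_eq_getElem?]
  obtain ⟨z, hz⟩ := List.getLast?_isSome.mpr (List.cons_ne_nil x r) |> Option.isSome_iff_exists.mp
  unfold pvCondA
  simp only [hg1, hg2, hz]
  cases hw : r.head? with
  | none => simp only [bne]; simp; split_ifs <;> omega
  | some w => simp only [bne]; simp; simp only [and_assoc]; ring


theorem final_unchanged (sp : List (List String)) (hnD : ¬ D_single_proper_noun_counts sp) :
    single_proper_noun_counts sp = single_proper_noun_counts_alt sp := by
  rw [pvB_char]
  cases hf : sp.flatten with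
  | nil => rw [pvA_char_nil sp hf]; simp [pvN]
  | cons x r =>
    rw [pvA_char_cons sp x r hf]
    unfold D_single_proper_noun_counts at hnD
    rw [hf] at hnD
    push Not at hnD
    simp only [List.head?_cons, Option.some.injEq, List.getElem?_cons_succ] at hnD
    have hr1 : (r[0]? : Option String) = r.head? := List.head?_eq_getElem?.symm
    rw [hr1] at hnD
    simp only [pvN]
    by_cases hx : x = "PROPN"
    · by_cases hw : r.head? = some "PROPN"
      · simp [hx, hw]
      · have hgl : (x :: r).getLast? ≠ some "PROPN" := fun h => hw (hnD hx h)
        subst hx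
        simp [hw, hgl]
    · simp [hx]


theorem final_tight (sp : List (List String)) (hD : D_single_proper_noun_counts sp) :
    single_proper_noun_counts sp ≠ single_proper_noun_counts_alt sp := by
  obtain ⟨h1, h2, h3⟩ := hD
  cases hf : sp.flatten with
  | nil => rw [hf] at h1; simp at h1
  | cons x r =>
    rw [hf] at h1 h2 h3
    simp only [List.head?_cons, Option.some.injEq] at h1
    subst h1
    have hr : r.head? ≠ some "PROPN" := by
      simpa [List.head?_eq_getElem?] using h3
    rw [pvA_char_cons sp _ _ hf, pvB_char, hf]
    simp only [pvN]
    simp [h2, hr]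


-- ===== VERDICT (by name: the statement is the Claim_ definition above) =====
theorem single_proper_noun_counts_spec : Claim_unchanged_single_proper_noun_counts := by
  intro sp _
  unfold Spec_single_proper_noun_counts
  intro hnD
  exact final_unchanged sp hnD
theorem single_proper_noun_counts_changed : Claim_changed_single_proper_noun_counts := by
  unfold Claim_changed_single_proper_noun_counts; decide
theorem single_proper_noun_counts_tight : Claim_exact_single_proper_noun_counts := by
  intro sp _ hD
  exact final_tight sp hD
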